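-- pv_equiv track=rewrite | github.com/nbrody/nbrody.github.io | python/CocompactLattice/app.py | count_elliptic_3
-- ===== SOURCE A (Python) =====
-- import math
--
-- def count_elliptic_3(N):
--     """Count elliptic points of order 3 for Γ₀(N)."""
--     if N % 9 == 0:
--         return 0
--     count = 1
--     temp = N
--     for p in range(2, int(math.sqrt(N)) + 2):
--         if temp % p == 0:
--             if p % 3 == 2:
--                 return 0
--             if p == 3:
--                 pass
--             else:
--                 count *= 2
--             while temp % p == 0:
--                 temp //= p
--     if temp > 1:
--         if temp % 3 == 2:
--             return 0
--         count *= 2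
--     return count
-- ===== SOURCE B (Python) =====
-- import math
--
--
-- def count_elliptic_3(N):
--     """Count elliptic points of order 3 for Γ₀(N).
--
--     Evaluates the classical character-sum identity: the count equals the sum
--     of the quadratic character mod 3 (chi = 0, 1, -1 for d % 3 = 0, 1, 2)
--     over the squarefree divisors d of N, forced to 0 when 9 divides N.
--     No factorization of N is performed: divisors are enumerated in pairs
--     (a, N // a) and squarefreeness is tested by scanning for square divisors.
--     """
--     if N % 9 == 0:
--         return 0
--     divisors = []
--     for a in range(1, math.isqrt(N) + 1):
--         if N % a == 0:
--             divisors.append(a)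
--             if a != N // a:
--                 divisors.append(N // a)
--     total = 0
--     for d in divisors:
--         if all(d % (k * k) != 0 for k in range(2, math.isqrt(d) + 1)):
--             total += [0, 1, -1][d % 3]
--     return total
-- ===== Notes on version B (the rewrite author's own statement) =====
-- stated objective: alternative
-- what changed: B replaces A's trial-division factorization entirely: it evaluates the classical character-sum identity (the count is the sum of the mod-3 quadratic character chi(d) over the squarefree divisors d of N, 0 when 9 | N), enumerating divisors of N in pairs (a, N // a) and testing squarefreeness by scanning for square divisors -- no prime is ever extracted.
-- intended difference: At N == 3 (the only input where the cofactor left after A's trial division is the prime 3 itself) A returns 2 because its post-loop tail doubles without checking for the prime 3, while B returns 1, the correct number of order-3 elliptic points for Gamma_0(3). — e.g. on count_elliptic_3(3): A returns 2, B returns 1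
import Mathlib
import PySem

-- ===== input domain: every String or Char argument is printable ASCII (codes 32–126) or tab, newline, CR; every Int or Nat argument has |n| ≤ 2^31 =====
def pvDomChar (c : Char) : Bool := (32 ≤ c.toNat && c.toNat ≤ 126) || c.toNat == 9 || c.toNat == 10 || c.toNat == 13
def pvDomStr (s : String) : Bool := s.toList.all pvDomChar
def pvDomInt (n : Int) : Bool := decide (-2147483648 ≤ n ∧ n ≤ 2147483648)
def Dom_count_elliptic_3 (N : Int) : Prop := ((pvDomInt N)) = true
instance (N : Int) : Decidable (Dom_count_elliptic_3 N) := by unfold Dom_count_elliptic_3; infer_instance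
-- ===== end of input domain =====

-- B abandons A's trial-division factorization: it evaluates the character-sum identity
-- (sum of the mod-3 character over the squarefree divisors of N, 0 when 9 | N) by direct
-- divisor enumeration; objective: alternative (B is O(N), A is O(sqrt N); not faster).
-- A and B differ only at N = 3 (see D_ below).

-- ===== PORT A =====

-- arithmetic facts about one exact division step (used by pvStrip's termination and the lemmas)
theorem pvDivFacts (temp p : Int) (h1 : 1 ≤ temp) (h2 : 2 ≤ p)
    (h3 : PySem.Int.mod temp p = 0) :
    1 ≤ PySem.Int.floordiv temp p ∧ PySem.Int.floordiv temp p < temp ∧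
      p ∣ PySem.Int.floordiv temp p * p ∧ PySem.Int.floordiv temp p * p = temp := by
  have hdvd : p ∣ temp := (PySem.Int.mod_eq_zero_iff_dvd temp p).mp h3
  obtain ⟨k, hk⟩ := hdvd
  have hq : PySem.Int.floordiv temp p = k := by
    rw [PySem.Int.floordiv_eq_ediv_of_pos (by omega : (0:Int) < p), hk,
      Int.mul_ediv_cancel_left k (by omega : p ≠ 0)]
  have hk1 : 1 ≤ k := by nlinarith
  have hlt : k < temp := by nlinarith
  refine ⟨hq ▸ hk1, hq ▸ hlt, ⟨PySem.Int.floordiv temp p, by ring⟩, ?_⟩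
  rw [hq, hk]; ring

-- 'while temp % p == 0: temp //= p' — the guard '1 ≤ temp ∧ 2 ≤ p' only makes the
-- recursion total; it always holds where the Python loop runs.
def pvStrip (temp p : Int) : Int :=
  if h : 1 ≤ temp ∧ 2 ≤ p ∧ PySem.Int.mod temp p = 0 then
    pvStrip (PySem.Int.floordiv temp p) p
  else temp
termination_by temp.toNat
decreasing_by
  obtain ⟨h1, h2, h3⟩ := h
  obtain ⟨ha, hb, -⟩ := pvDivFacts temp p h1 h2 h3
  omega

-- the 'for p in range(...)' loop of A, carrying (temp, count); early 'return 0'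
-- and the post-loop tail are the base/short-circuit cases
def pvLoopA : List Int → Int → Int → Int
  | [], temp, count =>
      if 1 < temp then (if PySem.Int.mod temp 3 = 2 then 0 else count * 2) else count
  | p :: rest, temp, count =>
      if PySem.Int.mod temp p = 0 then
        if PySem.Int.mod p 3 = 2 then 0
        else if p = 3 then pvLoopA rest (pvStrip temp p) count
        else pvLoopA rest (pvStrip temp p) (count * 2)
      else pvLoopA rest temp count

-- int(math.sqrt(N)) is ported as Nat.sqrt, exact for 0 ≤ N ≤ 2^31 (the Dom bound);
-- for N < 0 Python raises ValueError there, excluded by Pre_ below.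
def count_elliptic_3 (N : Int) : Int :=
  if PySem.Int.mod N 9 = 0 then 0
  else pvLoopA (PySem.List.pyRange 2 ((Nat.sqrt N.toNat : Int) + 2) 1) N 1

-- ===== PORT B =====

-- `[0, 1, -1][d % 3]` — d % 3 is always 0, 1 or 2 (Python mod, positive divisor),
-- so the lookup never fails and the .getD default is never used.
def pvChi (d : Int) : Int := (PySem.List.pyGet? [0, 1, -1] (PySem.Int.mod d 3)).getD 0

-- `all(d % (k * k) != 0 for k in range(2, math.isqrt(d) + 1))`; math.isqrt → Nat.sqrt
-- (exact for the d ≥ 0 this is called on)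
def pvSquarefreeB (d : Int) : Bool :=
  (PySem.List.pyRange 2 ((Nat.sqrt d.toNat : Int) + 1) 1).all
    (fun k => decide (PySem.Int.mod d (k * k) ≠ 0))

-- first loop: collect the divisors in pairs (a, N // a); second loop: accumulate total
def count_elliptic_3_alt (N : Int) : Int :=
  if PySem.Int.mod N 9 = 0 then 0
  else
    ((PySem.List.pyRange 1 ((Nat.sqrt N.toNat : Int) + 1) 1).foldl
      (fun divs a =>
        if PySem.Int.mod N a = 0 then
          if a ≠ PySem.Int.floordiv N a then (divs ++ [a]) ++ [PySem.Int.floordiv N a]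
          else divs ++ [a]
        else divs) []).foldl
      (fun total d => if pvSquarefreeB d = true then total + pvChi d else total) 0

-- ===== PRECONDITION & SPEC =====

-- Pre_ excludes exactly the N < 0 with N % 9 ≠ 0, on which math.sqrt(N) raises
-- ValueError in A.
def Pre_count_elliptic_3 (N : Int) : Prop := 0 ≤ N ∨ PySem.Int.mod N 9 = 0
instance (N : Int) : Decidable (Pre_count_elliptic_3 N) := by
  unfold Pre_count_elliptic_3; infer_instance

def pvWitness_count_elliptic_3 : Int := 12

-- At N = 3 (the only input whose leftover cofactor after trial division is the prime 3)
-- A returns 2 — its post-loop tail doubles the count without checking for the prime 3 —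
-- while B returns 1, the correct count of order-3 elliptic points for Γ₀(3).
def D_count_elliptic_3 (N : Int) : Prop := N = 3
instance (N : Int) : Decidable (D_count_elliptic_3 N) := by
  unfold D_count_elliptic_3; infer_instance

def Spec_count_elliptic_3 (N : Int) (out : Int) : Prop :=
  ¬ D_count_elliptic_3 N → out = count_elliptic_3_alt N
instance (N : Int) (out : Int) : Decidable (Spec_count_elliptic_3 N out) := by
  unfold Spec_count_elliptic_3; infer_instance

def pvDiffWitness_count_elliptic_3 : Int := 3
def pvDiffWitnessOut_count_elliptic_3 : Int × Int := (2, 1)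

-- ===== CLAIM (what is proved, stated in full; the proofs are below) =====
def Claim_unchanged_count_elliptic_3 : Prop :=
  ∀ (N : Int), Dom_count_elliptic_3 N → Pre_count_elliptic_3 N →
    Spec_count_elliptic_3 N (count_elliptic_3 N)
def Claim_changed_count_elliptic_3 : Prop :=
  Dom_count_elliptic_3 (pvDiffWitness_count_elliptic_3) ∧
  Pre_count_elliptic_3 (pvDiffWitness_count_elliptic_3) ∧
  D_count_elliptic_3 (pvDiffWitness_count_elliptic_3) ∧
  count_elliptic_3 (pvDiffWitness_count_elliptic_3) = pvDiffWitnessOut_count_elliptic_3.1 ∧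
  count_elliptic_3_alt (pvDiffWitness_count_elliptic_3) = pvDiffWitnessOut_count_elliptic_3.2 ∧
  pvDiffWitnessOut_count_elliptic_3.1 ≠ pvDiffWitnessOut_count_elliptic_3.2
def Claim_exact_count_elliptic_3 : Prop :=
  ∀ (N : Int), Dom_count_elliptic_3 N → Pre_count_elliptic_3 N → D_count_elliptic_3 N →
    count_elliptic_3 N ≠ count_elliptic_3_alt N

-- ===== LEMMAS AND PROOFS =====

-- ---- A-side: A's loop equals the closed formula over the trial-division factor list ----

-- the distinct factors A's loop strips, collected as a list (proof-only helper; it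
-- mirrors A's loop structure so that pvMain below can relate A to a closed formula)
def pvFactorLoop : List Int → Int → List Int → List Int
  | [], temp, acc => if 1 < temp then acc ++ [temp] else acc
  | p :: rest, temp, acc =>
      if PySem.Int.mod temp p = 0 then pvFactorLoop rest (pvStrip temp p) (acc ++ [p])
      else pvFactorLoop rest temp acc

-- the final value of temp after the whole loop (proof-only helper)
def pvLeft : List Int → Int → Int
  | [], temp => temp
  | p :: rest, temp =>
      if PySem.Int.mod temp p = 0 then pvLeft rest (pvStrip temp p) else pvLeft rest temp

theorem pvStrip_pos (temp p : Int) (h : 1 ≤ temp) : 1 ≤ pvStrip temp p := by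
  induction temp using pvStrip.induct p with
  | case1 temp hg ih =>
      rw [pvStrip, dif_pos hg]
      obtain ⟨h1, h2, h3⟩ := hg
      exact ih (pvDivFacts temp p h1 h2 h3).1
  | case2 temp hg => rw [pvStrip, dif_neg hg]; exact h

theorem pvStrip_dvd (temp p : Int) : pvStrip temp p ∣ temp := by
  induction temp using pvStrip.induct p with
  | case1 temp hg ih =>
      rw [pvStrip, dif_pos hg]
      obtain ⟨h1, h2, h3⟩ := hg
      obtain ⟨-, -, -, he⟩ := pvDivFacts temp p h1 h2 h3
      exact dvd_trans ih ⟨p, he.symm⟩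
  | case2 temp hg => rw [pvStrip, dif_neg hg]

theorem pvStrip_not_dvd (temp p : Int) (h : 1 ≤ temp) (hp : 2 ≤ p) :
    ¬ p ∣ pvStrip temp p := by
  induction temp using pvStrip.induct p with
  | case1 temp hg ih =>
      rw [pvStrip, dif_pos hg]
      obtain ⟨h1, h2, h3⟩ := hg
      exact ih (pvDivFacts temp p h1 h2 h3).1
  | case2 temp hg =>
      rw [pvStrip, dif_neg hg]
      intro hdvd
      exact hg ⟨h, hp, (PySem.Int.mod_eq_zero_iff_dvd temp p).mpr hdvd⟩

-- temp = (pvStrip temp p) * p ^ k for some k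
theorem pvStrip_pow (temp p : Int) (h : 1 ≤ temp) (hp : 2 ≤ p) :
    ∃ k : ℕ, temp = pvStrip temp p * p ^ k := by
  induction temp using pvStrip.induct p with
  | case1 temp hg ih =>
      rw [pvStrip, dif_pos hg]
      obtain ⟨h1, h2, h3⟩ := hg
      obtain ⟨ha, -, -, he⟩ := pvDivFacts temp p h1 h2 h3
      obtain ⟨k, hk⟩ := ih ha
      refine ⟨k + 1, ?_⟩
      calc temp = PySem.Int.floordiv temp p * p := he.symm
        _ = pvStrip (PySem.Int.floordiv temp p) p * p ^ k * p := by rw [← hk]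
        _ = pvStrip (PySem.Int.floordiv temp p) p * p ^ (k + 1) := by ring
  | case2 temp hg => exact ⟨0, by rw [pvStrip, dif_neg hg]; ring⟩

theorem pvLeft_dvd (ps : List Int) (temp : Int) : pvLeft ps temp ∣ temp := by
  induction ps generalizing temp with
  | nil => exact dvd_refl _
  | cons p rest ih =>
      rw [pvLeft]
      split
      · exact dvd_trans (ih _) (pvStrip_dvd temp p)
      · exact ih temp

theorem pvLeft_pos (ps : List Int) (temp : Int) (h : 1 ≤ temp) : 1 ≤ pvLeft ps temp := by
  induction ps generalizing temp with
  | nil => exact h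
  | cons p rest ih =>
      rw [pvLeft]
      split
      · exact ih _ (pvStrip_pos temp p h)
      · exact ih temp h

theorem pvLeft_append (a b : List Int) (temp : Int) :
    pvLeft (a ++ b) temp = pvLeft b (pvLeft a temp) := by
  induction a generalizing temp with
  | nil => rfl
  | cons p rest ih =>
      rw [List.cons_append, pvLeft, pvLeft]
      split <;> exact ih _

theorem pvLeft_three_cons (ps : List Int) (t : Int) (h : 1 ≤ t) :
    pvLeft (3 :: ps) t ≠ 3 := by
  rw [pvLeft]
  split
  · rename_i hmod
    intro hc
    have hd := pvLeft_dvd ps (pvStrip t 3)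
    rw [hc] at hd
    exact pvStrip_not_dvd t 3 h (by omega) hd
  · rename_i hmod
    intro hc
    have hd := pvLeft_dvd ps t
    rw [hc] at hd
    exact hmod ((PySem.Int.mod_eq_zero_iff_dvd t 3).mpr hd)

theorem pvFactorLoop_acc (ps : List Int) (temp : Int) (acc : List Int) :
    pvFactorLoop ps temp acc = acc ++ pvFactorLoop ps temp [] := by
  induction ps generalizing temp acc with
  | nil =>
      rw [pvFactorLoop, pvFactorLoop]
      split <;> simp
  | cons p rest ih =>
      rw [pvFactorLoop, pvFactorLoop]
      split
      · rw [ih _ (acc ++ [p]), ih _ ([] ++ [p])]; simp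
      · exact ih _ acc

-- A's interleaved loop equals the closed formula over the factor list,
-- provided the leftover cofactor is not the prime 3 (the N = 3 quirk).
theorem pvMain (ps : List Int) (temp count : Int) (hleft : pvLeft ps temp ≠ 3) :
    pvLoopA ps temp count =
      if (pvFactorLoop ps temp []).any (fun p => PySem.Int.mod p 3 = 2) then 0
      else count * 2 ^ ((pvFactorLoop ps temp []).filter (fun p => p ≠ 3)).length := by
  induction ps generalizing temp count with
  | nil =>
      rw [pvLoopA, pvFactorLoop]
      rw [pvLeft] at hleft
      by_cases h1 : 1 < temp
      · simp only [if_pos h1, List.nil_append, List.any_cons, List.any_nil, Bool.or_false,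
          List.filter_cons, List.filter_nil, decide_eq_true_eq]
        by_cases h2 : PySem.Int.mod temp 3 = 2
        · rw [if_pos h2, if_pos h2]
        · rw [if_neg h2, if_neg h2, if_pos (show temp ≠ 3 from hleft)]
          simp
      · simp only [if_neg h1, List.any_nil, List.filter_nil, List.length_nil, pow_zero,
          mul_one, Bool.false_eq_true, if_false]
  | cons p rest ih =>
      rw [pvLoopA, pvFactorLoop]
      rw [pvLeft] at hleft
      by_cases hmod : PySem.Int.mod temp p = 0
      · simp only [if_pos hmod] at hleft ⊢
        rw [pvFactorLoop_acc rest (pvStrip temp p) ([] ++ [p])]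
        simp only [List.nil_append, List.cons_append]
        by_cases hp2 : PySem.Int.mod p 3 = 2
        · rw [if_pos hp2,
            show ((p :: pvFactorLoop rest (pvStrip temp p) []).any
                (fun q => PySem.Int.mod q 3 = 2)) = true from by
              simp only [List.any_cons, Bool.or_eq_true, decide_eq_true_eq]
              exact Or.inl hp2,
            if_pos rfl]
        · by_cases hp3 : p = 3
          · subst hp3
            rw [if_neg hp2, if_pos rfl, ih _ count hleft]
            rw [List.any_cons,
              show (decide (PySem.Int.mod (3:Int) 3 = 2)) = false from by decide,
              Bool.false_or, List.filter_cons,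
              show (decide ((3:Int) ≠ (3:Int))) = false from by decide]
            simp only [Bool.false_eq_true, if_false]
          · rw [if_neg hp2, if_neg hp3, ih _ (count * 2) hleft]
            rw [List.any_cons,
              show (decide (PySem.Int.mod p 3 = 2)) = false from by
                simpa using hp2,
              Bool.false_or, List.filter_cons,
              show (decide (p ≠ 3)) = true from by simpa using hp3, if_pos rfl]
            by_cases hany : ((pvFactorLoop rest (pvStrip temp p) []).any
                (fun q => PySem.Int.mod q 3 = 2)) = true
            · rw [if_pos hany, if_pos hany]
            · rw [if_neg hany, if_neg hany, List.length_cons, pow_succ]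
              ring
      · simp only [if_neg hmod] at hleft ⊢
        exact ih _ count hleft

theorem pvSqrt3 : Nat.sqrt 3 = 1 := by
  have h1 : 1 ≤ Nat.sqrt 3 := Nat.le_sqrt.mpr (by norm_num)
  have h2 : Nat.sqrt 3 < 2 := Nat.sqrt_lt.mpr (by norm_num)
  omega

theorem pvA3 : count_elliptic_3 3 = 2 := by
  rw [count_elliptic_3, if_neg (by decide : ¬ PySem.Int.mod 3 9 = 0)]
  rw [show ((3:Int).toNat) = 3 from rfl, pvSqrt3]
  decide

theorem pvLeft_range_ne_three (N : Int) (hN : 1 ≤ N) (hN3 : N ≠ 3)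
    (h9 : PySem.Int.mod N 9 ≠ 0) :
    pvLeft (PySem.List.pyRange 2 ((Nat.sqrt N.toNat : Int) + 2) 1) N ≠ 3 := by
  by_cases h3 : (3 : Int) ∣ N
  · -- 3 ∣ N, N ≠ 3, 9 ∤ N ⇒ N ≥ 6 ⇒ 3 is in the trial-division range and gets stripped
    obtain ⟨m, hm⟩ := h3
    have hN6 : 6 ≤ N := by omega
    have hs : 2 ≤ Nat.sqrt N.toNat := Nat.le_sqrt.mpr (by omega)
    have hb : (3 : Int) < (Nat.sqrt N.toNat : Int) + 2 := by exact_mod_cast by omega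
    rw [PySem.List.pyRange_one_append 2 3 ((Nat.sqrt N.toNat : Int) + 2) (by omega) (by omega)]
    rw [pvLeft_append]
    rw [PySem.List.pyRange_one_cons hb]
    exact pvLeft_three_cons _ _ (pvLeft_pos _ N hN)
  · intro hc
    have hd := pvLeft_dvd (PySem.List.pyRange 2 ((Nat.sqrt N.toNat : Int) + 2) 1) N
    rw [hc] at hd
    exact h3 hd

-- ---- trial-division correctness: the factor list is exactly the prime factors ----

-- divisibility of nonnegative Ints transfers to their toNats
theorem pvDvdCast (x y : Int) (hx : 0 ≤ x) (hy : 0 ≤ y) : x ∣ y ↔ x.toNat ∣ y.toNat := by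
  rw [← Int.natCast_dvd_natCast, Int.toNat_of_nonneg hx, Int.toNat_of_nonneg hy]

-- a number < c² with no divisor in [2, c) is prime
theorem pvNatPrime_of_no_small (t c : ℕ) (ht : 2 ≤ t) (hc : 2 ≤ c)
    (hs : ∀ q : ℕ, 2 ≤ q → q < c → ¬ q ∣ t) (hb : t < c * c) : t.Prime := by
  by_contra hnp
  have h1 := Nat.minFac_sq_le_self (show 0 < t by omega) hnp
  have hp := Nat.minFac_prime (show t ≠ 1 by omega)
  have hd := Nat.minFac_dvd t
  have h2 : 2 ≤ t.minFac := hp.two_le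
  have hcm : c ≤ t.minFac := by
    by_contra hlt
    exact hs _ h2 (by omega) hd
  have : c * c ≤ t.minFac * t.minFac := Nat.mul_le_mul hcm hcm
  have : t.minFac ^ 2 = t.minFac * t.minFac := sq (t.minFac)
  omega

-- a prime Int is ≥ 2 once nonnegative, and its toNat is a Nat prime
theorem pvPrimeToNat (x : Int) (hx : 0 ≤ x) : Prime x ↔ Nat.Prime x.toNat := by
  rw [Int.prime_iff_natAbs_prime]
  have : x.natAbs = x.toNat := by omega
  rw [this]

-- the exhausted-candidates case: temp has no divisor in [2, a) and temp < a², so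
-- temp is 1 (nothing appended) or prime (appended as the final cofactor)
theorem pvFactor_nil (a temp : Int) (ha : 2 ≤ a) (ht : 1 ≤ temp)
    (hsmall : ∀ q : Int, 2 ≤ q → q < a → ¬ q ∣ temp) (hbb : temp < a * a) :
    (pvFactorLoop [] temp []).Nodup ∧
    (∀ x : Int, x ∈ pvFactorLoop [] temp [] ↔ Prime x ∧ 0 ≤ x ∧ x ∣ temp) := by
  rw [pvFactorLoop]
  by_cases h1 : 1 < temp
  · rw [if_pos h1]
    simp only [List.nil_append]
    have htn : temp.toNat < a.toNat * a.toNat := by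
      have hcast : ((a.toNat * a.toNat : ℕ) : Int) = a * a := by
        push_cast [Int.toNat_of_nonneg (show (0:Int) ≤ a by omega)]
        ring
      omega
    have htp : Nat.Prime temp.toNat := by
      refine pvNatPrime_of_no_small temp.toNat a.toNat (by omega) (by omega) ?_ htn
      intro q hq hqa hqd
      exact hsmall (q : Int) (by omega) (by omega)
        ((pvDvdCast (q : Int) temp (by omega) (by omega)).mpr (by simpa using hqd))
    have htP : Prime temp := (pvPrimeToNat temp (by omega)).mpr htp
    refine ⟨List.nodup_singleton _, fun x => ?_⟩
    simp only [List.mem_singleton]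
    constructor
    · rintro rfl; exact ⟨htP, by omega, dvd_refl _⟩
    · rintro ⟨hxp, hx0, hxd⟩
      have hxn : Nat.Prime x.toNat := (pvPrimeToNat x hx0).mp hxp
      have hdn : x.toNat ∣ temp.toNat := (pvDvdCast x temp hx0 (by omega)).mp hxd
      have := (Nat.prime_dvd_prime_iff_eq hxn htp).mp hdn
      omega
  · rw [if_neg h1]
    have : temp = 1 := by omega
    subst this
    refine ⟨List.nodup_nil, fun x => ?_⟩
    simp only [List.not_mem_nil, false_iff]
    rintro ⟨hxp, -, hxd⟩
    exact hxp.not_unit (isUnit_of_dvd_one hxd)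

-- the factor list collected over candidates [a, b) from temp: precisely the (positive,
-- Int-prime) prime factors of temp, each once, provided candidates below a are already
-- stripped and temp < b².
theorem pvFactor_char (n : ℕ) : ∀ (a b temp : Int), b - a ≤ (n : Int) → 2 ≤ a → 2 ≤ b →
    1 ≤ temp →
    (∀ q : Int, 2 ≤ q → q < a → ¬ q ∣ temp) → temp < b * b →
    (pvFactorLoop (PySem.List.pyRange a b 1) temp []).Nodup ∧
    (∀ x : Int, x ∈ pvFactorLoop (PySem.List.pyRange a b 1) temp [] ↔
      Prime x ∧ 0 ≤ x ∧ x ∣ temp) := by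
  induction n with
  | zero =>
      intro a b temp hn ha hb ht hsmall hbb
      have hab : b ≤ a := by omega
      rw [PySem.List.pyRange_one_eq_nil hab]
      have : b * b ≤ a * a := by nlinarith
      exact pvFactor_nil a temp ha ht hsmall (by omega)
  | succ n ih =>
      intro a b temp hn ha hb ht hsmall hbb
      by_cases hab : b ≤ a
      · rw [PySem.List.pyRange_one_eq_nil hab]
        have : b * b ≤ a * a := by nlinarith
        exact pvFactor_nil a temp ha ht hsmall (by omega)
      · push_neg at hab
        rw [PySem.List.pyRange_one_cons hab, pvFactorLoop]
        by_cases hmod : PySem.Int.mod temp a = 0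
        · rw [if_pos hmod]
          have hadvd : a ∣ temp := (PySem.Int.mod_eq_zero_iff_dvd temp a).mp hmod
          have han : a.toNat < a.toNat * a.toNat := by
            have h2 : 2 ≤ a.toNat := by omega
            nlinarith
          have hap : Nat.Prime a.toNat := by
            refine pvNatPrime_of_no_small a.toNat a.toNat (by omega) (by omega) ?_ han
            intro q hq hqa hqd
            have h1 : (q : Int) ∣ a :=
              (pvDvdCast (q : Int) a (by omega) (by omega)).mpr (by simpa using hqd)
            exact hsmall (q : Int) (by omega) (by omega) (h1.trans hadvd)
          have haP : Prime a := (pvPrimeToNat a (by omega)).mpr hap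
          have hs1 : 1 ≤ pvStrip temp a := pvStrip_pos temp a ht
          have hsd : pvStrip temp a ∣ temp := pvStrip_dvd temp a
          have hand : ¬ a ∣ pvStrip temp a := pvStrip_not_dvd temp a ht (by omega)
          obtain ⟨k, hk⟩ := pvStrip_pow temp a ht (by omega)
          have hsle : pvStrip temp a ≤ temp := Int.le_of_dvd (by omega) hsd
          have hsmall' : ∀ q : Int, 2 ≤ q → q < a + 1 → ¬ q ∣ pvStrip temp a := by
            intro q h2 hlt hqd
            by_cases hqa : q = a
            · exact hand (hqa ▸ hqd)
            · exact hsmall q h2 (by omega) (hqd.trans hsd)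
          obtain ⟨ihN, ihM⟩ := ih (a + 1) b (pvStrip temp a) (by omega) (by omega) hb hs1
            hsmall' (by omega)
          rw [pvFactorLoop_acc]
          simp only [List.nil_append, List.singleton_append]
          constructor
          · rw [List.nodup_cons]
            refine ⟨fun hmem => ?_, ihN⟩
            exact hand ((ihM a).mp hmem).2.2
          · intro x
            rw [List.mem_cons, ihM]
            constructor
            · rintro (rfl | ⟨hxp, hx0, hxd⟩)
              · exact ⟨haP, by omega, hadvd⟩
              · exact ⟨hxp, hx0, hxd.trans hsd⟩
            · rintro ⟨hxp, hx0, hxd⟩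
              by_cases hxa : x = a
              · exact Or.inl hxa
              · refine Or.inr ⟨hxp, hx0, ?_⟩
                rw [hk] at hxd
                rcases hxp.dvd_mul.mp hxd with h | h
                · exact h
                · exfalso
                  have hxa' : x ∣ a := hxp.dvd_of_dvd_pow h
                  have hxn : Nat.Prime x.toNat := (pvPrimeToNat x hx0).mp hxp
                  have hdn : x.toNat ∣ a.toNat := (pvDvdCast x a hx0 (by omega)).mp hxa'
                  have := (Nat.prime_dvd_prime_iff_eq hxn hap).mp hdn
                  exact hxa (by omega)
        · rw [if_neg hmod]
          have hnd : ¬ a ∣ temp := fun hd =>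
            hmod ((PySem.Int.mod_eq_zero_iff_dvd temp a).mpr hd)
          refine ih (a + 1) b temp (by omega) (by omega) hb ht ?_ hbb
          intro q h2 hlt hqd
          by_cases hqa : q = a
          · exact hnd (hqa ▸ hqd)
          · exact hsmall q h2 (by omega) hqd

-- ---- the mod-3 character ----

def pvChiN (d : ℕ) : Int := if d % 3 = 0 then 0 else if d % 3 = 1 then 1 else -1

theorem pvChiN_mul (a b : ℕ) : pvChiN (a * b) = pvChiN a * pvChiN b := by
  have ha : a % 3 = 0 ∨ a % 3 = 1 ∨ a % 3 = 2 := by omega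
  have hb : b % 3 = 0 ∨ b % 3 = 1 ∨ b % 3 = 2 := by omega
  have hab : (a * b) % 3 = (a % 3) * (b % 3) % 3 := Nat.mul_mod a b 3
  rcases ha with h | h | h <;> rcases hb with h' | h' | h' <;>
    simp [pvChiN, hab, h, h']

theorem pvChi_eq (d : Int) (hd : 0 ≤ d) : pvChi d = pvChiN d.toNat := by
  unfold pvChi
  rw [PySem.Int.mod_eq_emod_of_pos (by norm_num : (0:Int) < 3)]
  have hr : d.toNat % 3 = 0 ∨ d.toNat % 3 = 1 ∨ d.toNat % 3 = 2 := by omega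
  rcases hr with h | h | h
  · rw [show d % 3 = (0:Int) from by omega]
    simp [pvChiN, h, PySem.List.pyGet?, PySem.List.pyIdx?]
  · rw [show d % 3 = (1:Int) from by omega]
    simp [pvChiN, h, PySem.List.pyGet?, PySem.List.pyIdx?]
  · rw [show d % 3 = (2:Int) from by omega]
    simp [pvChiN, h, PySem.List.pyGet?, PySem.List.pyIdx?]

theorem pvChiN_prod (s : Finset ℕ) : pvChiN (∏ p ∈ s, p) = ∏ p ∈ s, pvChiN p := by
  induction s using Finset.cons_induction with
  | empty => simp [pvChiN]
  | cons a s ha ih => rw [Finset.prod_cons, Finset.prod_cons, pvChiN_mul, ih]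

theorem pvMod3_iff (x : Int) (hx : 0 ≤ x) :
    PySem.Int.mod x 3 = 2 ↔ x.toNat % 3 = 2 := by
  rw [PySem.Int.mod_eq_emod_of_pos (by norm_num : (0:Int) < 3)]
  omega

-- ---- the common closed formula both programs compute (proof-only) ----

def pvG (n : ℕ) : Int :=
  if ∃ p ∈ n.primeFactors, p % 3 = 2 then 0 else 2 ^ (n.primeFactors.erase 3).card

-- the trial-division factor list of N (proof-only name for A's factor list)
def pvL (N : Int) : List Int :=
  pvFactorLoop (PySem.List.pyRange 2 ((Nat.sqrt N.toNat : Int) + 2) 1) N []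

theorem pvL_spec (N : Int) (hN : 1 ≤ N) :
    (pvL N).Nodup ∧ (∀ x : Int, x ∈ pvL N ↔ Prime x ∧ 0 ≤ x ∧ x ∣ N) := by
  have hsq : N.toNat < (Nat.sqrt N.toNat + 2) * (Nat.sqrt N.toNat + 2) := by
    have h := Nat.lt_succ_sqrt N.toNat
    nlinarith
  refine pvFactor_char ((Nat.sqrt N.toNat : Int) + 2 - 2).toNat 2
    ((Nat.sqrt N.toNat : Int) + 2) N (by omega) (by norm_num) (by omega) hN
    (fun q h2 hq => absurd (lt_of_lt_of_le hq (by omega)) (by omega)) ?_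
  calc N = (N.toNat : Int) := by omega
    _ < (((Nat.sqrt N.toNat + 2) * (Nat.sqrt N.toNat + 2) : ℕ) : Int) := by
        exact_mod_cast hsq
    _ = ((Nat.sqrt N.toNat : Int) + 2) * ((Nat.sqrt N.toNat : Int) + 2) := by
        push_cast; ring

theorem pvL_two_le (N : Int) (hN : 1 ≤ N) : ∀ x ∈ pvL N, 2 ≤ x := by
  intro x hx
  obtain ⟨hxp, hx0, -⟩ := ((pvL_spec N hN).2 x).mp hx
  have := ((pvPrimeToNat x hx0).mp hxp).two_le
  omega

theorem pvL_toNat_finset (N : Int) (hN : 1 ≤ N) :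
    ((pvL N).map Int.toNat).toFinset = N.toNat.primeFactors := by
  ext q
  simp only [List.mem_toFinset, List.mem_map, Nat.mem_primeFactors]
  constructor
  · rintro ⟨x, hx, rfl⟩
    obtain ⟨hxp, hx0, hxd⟩ := ((pvL_spec N hN).2 x).mp hx
    exact ⟨(pvPrimeToNat x hx0).mp hxp, (pvDvdCast x N hx0 (by omega)).mp hxd, by omega⟩
  · rintro ⟨hq, hqd, -⟩
    refine ⟨(q : Int), ((pvL_spec N hN).2 (q : Int)).mpr ⟨?_, by omega, ?_⟩, by simp⟩
    · rw [pvPrimeToNat (q : Int) (by omega)]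
      simpa using hq
    · rw [pvDvdCast (q : Int) N (by omega) (by omega)]
      simpa using hqd

theorem pvL_any (N : Int) (hN : 1 ≤ N) :
    ((pvL N).any fun p => decide (PySem.Int.mod p 3 = 2)) = true ↔
      ∃ p ∈ N.toNat.primeFactors, p % 3 = 2 := by
  rw [List.any_eq_true]
  constructor
  · rintro ⟨x, hx, hm⟩
    have hx2 := pvL_two_le N hN x hx
    obtain ⟨hxp, hx0, hxd⟩ := ((pvL_spec N hN).2 x).mp hx
    refine ⟨x.toNat, ?_, ?_⟩
    · rw [← pvL_toNat_finset N hN]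
      simp only [List.mem_toFinset, List.mem_map]
      exact ⟨x, hx, rfl⟩
    · exact (pvMod3_iff x hx0).mp (by simpa using hm)
  · rintro ⟨p, hp, hp2⟩
    rw [← pvL_toNat_finset N hN] at hp
    simp only [List.mem_toFinset, List.mem_map] at hp
    obtain ⟨x, hx, rfl⟩ := hp
    have hx2 := pvL_two_le N hN x hx
    exact ⟨x, hx, by simpa using (pvMod3_iff x (by omega)).mpr hp2⟩

theorem pvL_count (N : Int) (hN : 1 ≤ N) :
    ((pvL N).filter (fun p => p ≠ 3)).length = (N.toNat.primeFactors.erase 3).card := by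
  obtain ⟨hnd, -⟩ := pvL_spec N hN
  have h2 := pvL_two_le N hN
  have hfe : (pvL N).filter (fun p => decide (p ≠ 3)) =
      (pvL N).filter (fun p => decide (p.toNat ≠ 3)) := by
    refine List.filter_congr (fun x hx => ?_)
    have := h2 x hx
    simp only [decide_eq_decide]
    omega
  have hmapnd : ((pvL N).map Int.toNat).Nodup := by
    refine List.Nodup.map_on (fun x hx y hy hxy => ?_) hnd
    have := h2 x hx
    have := h2 y hy
    omega
  calc ((pvL N).filter (fun p => p ≠ 3)).length
      = (((pvL N).map Int.toNat).filter (fun q => q ≠ 3)).length := by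
        rw [List.filter_map, List.length_map]
        simp only [Function.comp_def]
        rw [hfe]
    _ = (((pvL N).map Int.toNat).filter (fun q => q ≠ 3)).toFinset.card := by
        rw [List.toFinset_card_of_nodup (hmapnd.filter _)]
    _ = (((pvL N).map Int.toNat).toFinset.filter (fun q => q ≠ 3)).card := by
        rw [List.toFinset_filter]
        simp
    _ = (N.toNat.primeFactors.erase 3).card := by
        rw [pvL_toNat_finset N hN, Finset.filter_ne']

-- A = pvG on the admitted inputs (N ≥ 1, 9 ∤ N, N ≠ 3)
theorem pvA_eq_G (N : Int) (hN : 1 ≤ N) (hN3 : N ≠ 3) (h9 : PySem.Int.mod N 9 ≠ 0) :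
    count_elliptic_3 N = pvG N.toNat := by
  rw [count_elliptic_3, if_neg h9,
    pvMain _ _ _ (pvLeft_range_ne_three N hN hN3 h9)]
  rw [show pvFactorLoop (PySem.List.pyRange 2 ((Nat.sqrt N.toNat : Int) + 2) 1) N [] =
    pvL N from rfl]
  unfold pvG
  by_cases hex : ∃ p ∈ N.toNat.primeFactors, p % 3 = 2
  · rw [if_pos ((pvL_any N hN).mpr hex), if_pos hex]
  · rw [if_neg (fun h => hex ((pvL_any N hN).mp h)), if_neg hex, one_mul, pvL_count N hN]

-- ---- B-side: the foldl evaluates the character sum over squarefree divisors ----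

theorem pvFoldSum (P : Int → Prop) [DecidablePred P] (f : Int → Int) :
    ∀ (l : List Int) (init : Int),
      l.foldl (fun t d => if P d then t + f d else t) init
        = init + (l.map (fun d => if P d then f d else 0)).sum := by
  intro l
  induction l with
  | nil => intro init; simp
  | cons d rest ih =>
      intro init
      rw [List.foldl_cons, List.map_cons, List.sum_cons, ih]
      by_cases h : P d
      · rw [if_pos h, if_pos h]; ring
      · rw [if_neg h, if_neg h]; ring

theorem pvRangeSum (F : Int → Int) (n : ℕ) :
    ((PySem.List.pyRange 1 ((n : Int) + 1) 1).map F).sum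
      = ∑ k ∈ Finset.range n, F ((k : Int) + 1) := by
  induction n with
  | zero => simp [PySem.List.pyRange_one_eq_nil (by norm_num : (1:Int)+1-1 ≤ 1)]
  | succ n ih =>
      rw [show ((n + 1 : ℕ) : Int) + 1 = ((n : Int) + 1) + 1 by push_cast; ring,
        PySem.List.pyRange_one_succ_right (by omega : (1:Int) ≤ (n : Int) + 1),
        List.map_append, List.sum_append, ih, Finset.sum_range_succ]
      simp

theorem pvSquarefreeB_iff (d : ℕ) (hd : 1 ≤ d) :
    pvSquarefreeB (d : Int) = true ↔ Squarefree d := by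
  unfold pvSquarefreeB
  rw [Int.toNat_natCast, List.all_eq_true]
  constructor
  · intro h
    rw [Nat.squarefree_iff_prime_squarefree]
    intro p hp hdvd
    have hple : p ≤ Nat.sqrt d := Nat.le_sqrt.mpr (Nat.le_of_dvd hd hdvd)
    have hmem : (p : Int) ∈ PySem.List.pyRange 2 ((Nat.sqrt d : Int) + 1) 1 := by
      rw [PySem.List.mem_pyRange_one]
      constructor
      · exact_mod_cast hp.two_le
      · omega
    have := h (p : Int) hmem
    simp only [decide_eq_true_eq] at this
    apply this
    rw [PySem.Int.mod_eq_zero_iff_dvd]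
    exact_mod_cast Int.natCast_dvd_natCast.mpr hdvd
  · intro hsf k hk
    rw [PySem.List.mem_pyRange_one] at hk
    simp only [decide_eq_true_eq]
    intro hmod0
    have hkd : k * k ∣ (d : Int) := (PySem.Int.mod_eq_zero_iff_dvd _ _).mp hmod0
    have hkn : k.toNat * k.toNat ∣ d := by
      have hk' : k = (k.toNat : Int) := by omega
      rw [hk'] at hkd
      exact_mod_cast hkd
    have := Nat.isUnit_iff.mp (hsf k.toNat hkn)
    omega

-- sums distribute over the flatMap that the divisor-collecting loop builds
theorem pvSumFlatMap (F : Int → List Int) (t : Int → Int) :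
    ∀ l : List Int, ((l.flatMap F).map t).sum = (l.map (fun a => ((F a).map t).sum)).sum := by
  intro l
  induction l with
  | nil => simp
  | cons a rest ih =>
      rw [List.flatMap_cons, List.map_append, List.sum_append, ih, List.map_cons,
        List.sum_cons]

-- divisor pairing: summing h over [1, √n] with each divisor a contributing for itself
-- and its cofactor n / a is summing h over all divisors
theorem pvPairSum (n : ℕ) (hn : 1 ≤ n) (f : ℕ → Int) :
    ∑ a ∈ Finset.Ico 1 (Nat.sqrt n + 1),
      (if a ∣ n then (if a = n / a then f a else f a + f (n / a)) else 0)
      = ∑ d ∈ n.divisors, f d := by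
  rw [← Finset.sum_filter]
  have hS1 : (Finset.Ico 1 (Nat.sqrt n + 1)).filter (fun a => a ∣ n)
      = n.divisors.filter (fun d => d * d ≤ n) := by
    ext a
    simp only [Finset.mem_filter, Finset.mem_Ico, Nat.mem_divisors]
    constructor
    · rintro ⟨⟨h1, h2⟩, hd⟩
      exact ⟨⟨hd, by omega⟩, Nat.le_sqrt.mp (by omega)⟩
    · rintro ⟨⟨hd, h0⟩, hsq⟩
      have h1 : 1 ≤ a := by
        rcases Nat.eq_zero_or_pos a with h | h
        · exact absurd (Nat.eq_zero_of_zero_dvd (h ▸ hd)) h0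
        · omega
      have := Nat.le_sqrt.mpr hsq
      exact ⟨⟨h1, by omega⟩, hd⟩
  rw [hS1,
    Finset.sum_congr rfl (fun a (_ : a ∈ n.divisors.filter (fun d => d * d ≤ n)) =>
      show (if a = n / a then f a else f a + f (n / a))
          = f a + (if a = n / a then 0 else f (n / a)) from by split_ifs <;> ring),
    Finset.sum_add_distrib,
    ← Finset.sum_filter_add_sum_filter_not n.divisors (fun d => d * d ≤ n) f]
  congr 1
  rw [Finset.sum_congr rfl (fun a (_ : a ∈ n.divisors.filter (fun d => d * d ≤ n)) =>
      show (if a = n / a then (0:Int) else f (n / a))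
          = (if a ≠ n / a then f (n / a) else 0) from by
        by_cases h : a = n / a
        · rw [if_pos h, if_neg (not_not_intro h)]
        · rw [if_neg h, if_pos h]),
    ← Finset.sum_filter, Finset.filter_filter]
  refine Finset.sum_nbij' (fun a => n / a) (fun d => n / d) ?_ ?_ ?_ ?_ ?_
  · intro a ha
    simp only [Finset.mem_filter, Nat.mem_divisors] at ha ⊢
    obtain ⟨⟨hd, h0⟩, hsq, hne⟩ := ha
    have hmul : n / a * a = n := Nat.div_mul_cancel hd
    have ha1 : 1 ≤ a := by
      rcases Nat.eq_zero_or_pos a with h | h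
      · exact absurd (Nat.eq_zero_of_zero_dvd (h ▸ hd)) h0
      · omega
    have he1 : 1 ≤ n / a := Nat.div_pos (Nat.le_of_dvd (by omega) hd) (by omega)
    have hlt : a < n / a := by
      rcases Nat.lt_or_ge a (n / a) with h | h
      · exact h
      · exfalso
        have h1 : n / a * a ≤ a * a := Nat.mul_le_mul h (le_refl a)
        have h2 : a * a = n / a * a := by omega
        exact hne (Nat.eq_of_mul_eq_mul_right (by omega) h2)
    refine ⟨⟨Nat.div_dvd_of_dvd hd, h0⟩, ?_⟩
    intro hcon
    have h1 : n / a * a < n / a * (n / a) := mul_lt_mul_of_pos_left hlt (by omega)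
    omega
  · intro d hd
    simp only [Finset.mem_filter, Nat.mem_divisors] at hd ⊢
    obtain ⟨⟨hdd, h0⟩, hsq⟩ := hd
    have hmul : n / d * d = n := Nat.div_mul_cancel hdd
    have hd1 : 1 ≤ d := by
      rcases Nat.eq_zero_or_pos d with h | h
      · exact absurd (Nat.eq_zero_of_zero_dvd (h ▸ hdd)) h0
      · omega
    have he1 : 1 ≤ n / d := Nat.div_pos (Nat.le_of_dvd (by omega) hdd) (by omega)
    have hlt : n / d < d := by
      rcases Nat.lt_or_ge (n / d) d with h | h
      · exact h
      · exfalso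
        have h1 : d * d ≤ n / d * d := Nat.mul_le_mul h (le_refl d)
        omega
    refine ⟨⟨Nat.div_dvd_of_dvd hdd, h0⟩, ?_, ?_⟩
    · have h1 : n / d * (n / d) ≤ n / d * d := Nat.mul_le_mul (le_refl _) (le_of_lt hlt)
      omega
    · rw [Nat.div_div_self hdd h0]
      omega
  · intro a ha
    simp only [Finset.mem_filter, Nat.mem_divisors] at ha
    exact Nat.div_div_self ha.1.1 ha.1.2
  · intro d hd
    simp only [Finset.mem_filter, Nat.mem_divisors] at hd
    exact Nat.div_div_self hd.1.1 hd.1.2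
  · intro a ha
    rfl

theorem pvB_sum (N : Int) (hN : 1 ≤ N) (h9 : PySem.Int.mod N 9 ≠ 0) :
    count_elliptic_3_alt N = ∑ d ∈ N.toNat.divisors with Squarefree d, pvChiN d := by
  obtain ⟨n, rfl⟩ : ∃ n : ℕ, N = (n : Int) := ⟨N.toNat, by omega⟩
  have hn1 : 1 ≤ n := by exact_mod_cast hN
  rw [count_elliptic_3_alt, if_neg h9, Int.toNat_natCast]
  have hstep : (fun (divs : List Int) (a : Int) =>
      if PySem.Int.mod (n : Int) a = 0 then
        if a ≠ PySem.Int.floordiv (n : Int) a then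
          (divs ++ [a]) ++ [PySem.Int.floordiv (n : Int) a]
        else divs ++ [a]
      else divs)
      = fun divs a => divs ++ (if PySem.Int.mod (n : Int) a = 0 then
          if a ≠ PySem.Int.floordiv (n : Int) a then [a, PySem.Int.floordiv (n : Int) a]
          else [a]
        else []) := by
    funext divs a
    split_ifs with h1 h2
    · rw [List.append_assoc]
      rfl
    · rfl
    · exact (List.append_nil divs).symm
  rw [hstep, PySem.List.foldl_append_eq_flatMap, List.nil_append,
    pvFoldSum (fun d => pvSquarefreeB d = true) pvChi, zero_add, pvSumFlatMap, pvRangeSum,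
    Finset.sum_filter, ← pvPairSum n hn1 (fun d => if Squarefree d then pvChiN d else 0),
    Finset.sum_Ico_eq_sum_range]
  simp only [Nat.add_sub_cancel]
  refine Finset.sum_congr rfl (fun k hk => ?_)
  rw [Finset.mem_range] at hk
  rw [show ((k : Int) + 1) = ((1 + k : ℕ) : Int) from by push_cast; ring]
  set a : ℕ := 1 + k with hadef
  have ha1 : 1 ≤ a := by omega
  rw [PySem.Int.floordiv_natCast n a]
  have hmd : (PySem.Int.mod ((n : ℕ) : Int) ((a : ℕ) : Int) = 0) ↔ a ∣ n := by
    rw [PySem.Int.mod_eq_zero_iff_dvd]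
    exact Int.natCast_dvd_natCast
  have hterm : ∀ d : ℕ, 1 ≤ d →
      (if pvSquarefreeB ((d : ℕ) : Int) = true then pvChi ((d : ℕ) : Int) else 0)
        = (if Squarefree d then pvChiN d else 0) := by
    intro d hd
    by_cases hsf : Squarefree d
    · rw [if_pos ((pvSquarefreeB_iff d hd).mpr hsf), if_pos hsf,
        pvChi_eq ((d : ℕ) : Int) (by positivity), Int.toNat_natCast]
    · rw [if_neg (fun h => hsf ((pvSquarefreeB_iff d hd).mp h)), if_neg hsf]
  by_cases hdvd : a ∣ n
  · have hco1 : 1 ≤ n / a := Nat.div_pos (Nat.le_of_dvd (by omega) hdvd) (by omega)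
    rw [if_pos (hmd.mpr hdvd), if_pos hdvd]
    by_cases heq : a = n / a
    · rw [if_neg (show ¬ ((a : ℕ) : Int) ≠ ((n / a : ℕ) : Int) from
          fun h => h (by exact_mod_cast heq)), if_pos heq]
      simp only [List.map_cons, List.map_nil, List.sum_cons, List.sum_nil, add_zero]
      exact hterm a ha1
    · rw [if_pos (show ((a : ℕ) : Int) ≠ ((n / a : ℕ) : Int) from
          fun h => heq (by exact_mod_cast h)), if_neg heq]
      simp only [List.map_cons, List.map_nil, List.sum_cons, List.sum_nil, add_zero]
      rw [hterm a ha1, hterm (n / a) hco1]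
  · rw [if_neg (fun h => hdvd (hmd.mp h)), if_neg hdvd]
    simp

theorem pvProd_eq_G (n : ℕ) (hn : n ≠ 0) :
    ∏ p ∈ n.primeFactors, (pvChiN p + 1) = pvG n := by
  unfold pvG
  by_cases hex : ∃ p ∈ n.primeFactors, p % 3 = 2
  · rw [if_pos hex]
    obtain ⟨p, hp, hp2⟩ := hex
    exact Finset.prod_eq_zero hp (by simp [pvChiN, hp2])
  · rw [if_neg hex]
    push_neg at hex
    have hstep : ∀ p ∈ n.primeFactors, pvChiN p + 1 = if p = 3 then 1 else 2 := by
      intro p hp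
      have hpp := Nat.prime_of_mem_primeFactors hp
      have h2 := hex p hp
      by_cases h3 : p = 3
      · subst h3; simp [pvChiN]
      · have h0 : p % 3 ≠ 0 := by
          intro h0
          exact h3 ((Nat.prime_dvd_prime_iff_eq Nat.prime_three hpp).mp
            (Nat.dvd_of_mod_eq_zero h0)).symm
        have h1 : p % 3 = 1 := by omega
        simp [pvChiN, h1, h3]
    calc ∏ p ∈ n.primeFactors, (pvChiN p + 1)
        = ∏ p ∈ n.primeFactors, (if p = 3 then (1:Int) else 2) :=
          Finset.prod_congr rfl hstep
      _ = ∏ p ∈ n.primeFactors.erase 3, (if p = 3 then (1:Int) else 2) :=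
          (Finset.prod_erase _ (by simp)).symm
      _ = ∏ _p ∈ n.primeFactors.erase 3, (2:Int) :=
          Finset.prod_congr rfl (fun p hp => if_neg (Finset.ne_of_mem_erase hp))
      _ = 2 ^ (n.primeFactors.erase 3).card := Finset.prod_const 2

-- B = pvG on the admitted inputs
theorem pvB_eq_G (N : Int) (hN : 1 ≤ N) (h9 : PySem.Int.mod N 9 ≠ 0) :
    count_elliptic_3_alt N = pvG N.toNat := by
  have hn0 : N.toNat ≠ 0 := by omega
  rw [pvB_sum N hN h9, Nat.sum_divisors_filter_squarefree hn0]
  rw [← pvProd_eq_G N.toNat hn0]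
  have hPF : (UniqueFactorizationMonoid.normalizedFactors N.toNat).toFinset
      = N.toNat.primeFactors := by
    rw [Nat.factors_eq]
    exact Nat.toFinset_factors N.toNat
  rw [hPF, Finset.prod_add]
  simp only [Finset.prod_const_one, mul_one]
  refine Finset.sum_congr rfl (fun t ht => ?_)
  have : (t.val.prod) = ∏ p ∈ t, p := by
    rw [Finset.prod_eq_multiset_prod]
    simp
  rw [this, pvChiN_prod]

theorem pvB3 : count_elliptic_3_alt 3 = 1 := by
  rw [pvB_eq_G 3 (by norm_num) (by decide),
    show ((3 : Int).toNat) = 3 from rfl]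
  unfold pvG
  rw [Nat.Prime.primeFactors Nat.prime_three]
  decide

-- ===== VERDICT (by name: the statement is the Claim_ definition above) =====
theorem count_elliptic_3_spec : Claim_unchanged_count_elliptic_3 := by
  intro N _ hpre hD
  unfold D_count_elliptic_3 at hD
  by_cases h9 : PySem.Int.mod N 9 = 0
  · rw [count_elliptic_3, if_pos h9, count_elliptic_3_alt, if_pos h9]
  · have hN1 : 1 ≤ N := by
      rcases hpre with h | h
      · rcases lt_or_eq_of_le h with h' | h'
        · omega
        · exfalso; apply h9; rw [← h']; decide
      · exact absurd h h9
    rw [pvA_eq_G N hN1 hD h9, pvB_eq_G N hN1 h9]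

theorem count_elliptic_3_changed : Claim_changed_count_elliptic_3 := by
  unfold Claim_changed_count_elliptic_3
  exact ⟨by decide, by decide, by decide, pvA3, pvB3, by decide⟩

theorem count_elliptic_3_tight : Claim_exact_count_elliptic_3 := by
  intro N _ _ hD
  unfold D_count_elliptic_3 at hD
  subst hD
  rw [pvA3, pvB3]
  decide
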